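-- pv_equiv track=rewrite | github.com/CrackerCat/Illegal_Services | Website_Builder.py | encode_unicode_encoding
-- ===== SOURCE A (Python) =====
-- def encode_unicode_encoding(string: str, type: str):
--     if type == "path":
--         replacements = {
--             '\\\\': 'U+005C',
--             '\\/': 'U+002F',
--         }
--     else:
--         replacements = {
--             '\\': 'U+005C',
--             '/': 'U+002F',
--         }
--     replacements.update({
--         ':': 'U+003A',
--         '*': 'U+002A',
--         '?': 'U+003F',
--         '"': 'U+0022',
--         '<': 'U+003C',
--         '>': 'U+003E',
--         '|': 'U+007C',
--     })
--     for chars, replacement in replacements.items():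
--         string = string.replace(chars, replacement)
--     return string
-- ===== SOURCE B (Python) =====
-- _MAP = {
--     ':': 'U+003A', '*': 'U+002A', '?': 'U+003F', '"': 'U+0022',
--     '<': 'U+003C', '>': 'U+003E', '|': 'U+007C',
-- }
--
-- def encode_unicode_encoding(string: str, type: str):
--     # One left-to-right pass instead of one full replace() scan per key.
--     path = (type == "path")
--     out = []
--     i = 0
--     n = len(string)
--     while i < n:
--         c = string[i]
--         if path and c == '\\' and i + 1 < n and string[i + 1] in '\\/':
--             out.append('U+005C' if string[i + 1] == '\\' else 'U+002F')
--             i += 2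
--         elif not path and c == '\\':
--             out.append('U+005C')
--             i += 1
--         elif not path and c == '/':
--             out.append('U+002F')
--             i += 1
--         elif c in _MAP:
--             out.append(_MAP[c])
--             i += 1
--         else:
--             out.append(c)
--             i += 1
--     return ''.join(out)
-- ===== Notes on version B (the rewrite author's own statement) =====
-- stated objective: alternative
-- what changed: Instead of nine sequential full-string str.replace passes (one per reserved key), B makes a single left-to-right pass over the string, consuming two characters for the path-mode '\\'/'\/' keys and one otherwise, emitting each replacement from a lookup table.
import Mathlib
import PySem

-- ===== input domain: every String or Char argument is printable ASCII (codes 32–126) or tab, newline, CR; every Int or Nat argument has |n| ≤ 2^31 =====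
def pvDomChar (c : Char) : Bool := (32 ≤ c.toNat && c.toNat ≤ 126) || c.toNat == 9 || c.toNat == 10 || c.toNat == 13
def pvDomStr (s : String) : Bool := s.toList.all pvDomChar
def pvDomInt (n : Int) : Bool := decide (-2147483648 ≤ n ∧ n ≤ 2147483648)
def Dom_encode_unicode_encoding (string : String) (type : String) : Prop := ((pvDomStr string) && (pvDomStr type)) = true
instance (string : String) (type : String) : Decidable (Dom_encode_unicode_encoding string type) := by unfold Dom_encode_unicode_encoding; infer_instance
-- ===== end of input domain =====

-- ===== PORT A =====
def encode_unicode_encoding (string : String) (type : String) : String :=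
  let replacements : PySem.Dict String String :=
    if type == "path" then
      PySem.Dict.mk [("\\\\", "U+005C"), ("\\/", "U+002F")]
    else
      PySem.Dict.mk [("\\", "U+005C"), ("/", "U+002F")]
  let replacements := replacements.update
    [(":", "U+003A"), ("*", "U+002A"), ("?", "U+003F"), ("\"", "U+0022"),
     ("<", "U+003C"), (">", "U+003E"), ("|", "U+007C")]
  replacements.items.foldl (fun s p => PySem.Str.replace s p.1 p.2) string

-- ===== PORT B =====
-- Source B's _MAP lookup with the two 'not path' branches in front of it, as in the elif chain
def pvEncChar (path : Bool) (c : Char) : List Char :=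
  if path = false ∧ c = '\\' then "U+005C".toList
  else if path = false ∧ c = '/' then "U+002F".toList
  else if c = ':' then "U+003A".toList
  else if c = '*' then "U+002A".toList
  else if c = '?' then "U+003F".toList
  else if c = '"' then "U+0022".toList
  else if c = '<' then "U+003C".toList
  else if c = '>' then "U+003E".toList
  else if c = '|' then "U+007C".toList
  else [c]

-- Source B's while loop: one left-to-right pass; in path mode a '\' followed by '\' or '/' consumes two chars
def pvEncGo (path : Bool) : List Char → List Char
  | [] => []
  | [c] => pvEncChar path c          -- last char: the 'i + 1 < n' test of the path branch fails
  | c :: d :: t =>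
    if path = true ∧ c = '\\' ∧ (d = '\\' ∨ d = '/') then
      (if d = '\\' then "U+005C".toList else "U+002F".toList) ++ pvEncGo path t
    else
      pvEncChar path c ++ pvEncGo path (d :: t)
  termination_by l => l.length

def encode_unicode_encoding_alt (string : String) (type : String) : String :=
  String.ofList (pvEncGo (type == "path") string.toList)

-- ===== PRECONDITION & SPEC =====
def Spec_encode_unicode_encoding (string : String) (type : String) (out : String) : Prop := out = encode_unicode_encoding_alt string type
instance (string : String) (type : String) (out : String) : Decidable (Spec_encode_unicode_encoding string type out) := by unfold Spec_encode_unicode_encoding; infer_instance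

-- ===== CLAIM (what is proved, stated in full; the proofs are below) =====
def Claim_equal_encode_unicode_encoding : Prop := ∀ (string : String) (type : String), Dom_encode_unicode_encoding string type → Spec_encode_unicode_encoding string type (encode_unicode_encoding string type)

-- ===== LEMMAS AND PROOFS =====

-- character lists of the replacement strings (no replaced character occurs in any of them)
def pvU5C : List Char := ['U','+','0','0','5','C']
def pvU2F : List Char := ['U','+','0','0','2','F']

-- the result of Python's s.replace(k, v) for a single-character key k
lemma pv_go_single (k : Char) (v : List Char) : ∀ (fuel : Nat) (l acc : List Char), l.length ≤ fuel →
    PySem.Chars.replace.go [k] v fuel l acc = acc.reverse ++ l.flatMap (fun c => if c = k then v else [c]) := by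
  intro fuel
  induction fuel with
  | zero =>
    intro l acc h
    have hl : l = [] := by cases l <;> simp_all
    subst hl
    simp [PySem.Chars.replace.go]
  | succ n ih =>
    intro l acc h
    cases l with
    | nil => simp [PySem.Chars.replace.go]
    | cons c t =>
      rw [PySem.Chars.replace.go]
      simp only [List.length_cons, Nat.add_le_add_iff_right] at h
      by_cases hc : c = k
      · subst hc
        simp only [List.isPrefixOf, BEq.rfl, Bool.and_self, if_pos]
        rw [ih _ _ (by simpa using h)]
        simp
      · have hpre : List.isPrefixOf [k] (c :: t) = false := by
          simp [List.isPrefixOf]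
          exact fun hq => absurd hq.symm hc
        rw [hpre]
        simp only [Bool.false_eq_true, if_neg, not_false_iff]
        rw [ih _ _ h]
        simp [hc]

lemma pv_replace_single (k : Char) (v l : List Char) :
    PySem.Chars.replace l [k] v = l.flatMap (fun c => if c = k then v else [c]) := by
  rw [PySem.Chars.replace]
  simp only [List.isEmpty_cons, Bool.false_eq_true, if_neg, not_false_iff]
  simpa using pv_go_single k v l.length l [] le_rfl

-- the result of Python's s.replace(ab, v) for a two-character key
def pvRep2 (a b : Char) (v : List Char) : List Char → List Char
  | [] => []
  | [c] => [c]
  | c :: d :: t => if c = a ∧ d = b then v ++ pvRep2 a b v t else c :: pvRep2 a b v (d :: t)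
  termination_by l => l.length

lemma pvRep2_nil (a b : Char) (v : List Char) : pvRep2 a b v [] = [] := by rw [pvRep2]
lemma pvRep2_one (a b : Char) (v : List Char) (c : Char) : pvRep2 a b v [c] = [c] := by rw [pvRep2]
lemma pvRep2_cons2 (a b : Char) (v : List Char) (c d : Char) (t : List Char) :
    pvRep2 a b v (c :: d :: t) = if c = a ∧ d = b then v ++ pvRep2 a b v t else c :: pvRep2 a b v (d :: t) := by
  rw [pvRep2]

lemma pv_go_two (a b : Char) (v : List Char) : ∀ (fuel : Nat) (l acc : List Char), l.length ≤ fuel →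
    PySem.Chars.replace.go [a, b] v fuel l acc = acc.reverse ++ pvRep2 a b v l := by
  intro fuel
  induction fuel with
  | zero =>
    intro l acc h
    have hl : l = [] := by cases l <;> simp_all
    subst hl
    simp [PySem.Chars.replace.go, pvRep2_nil]
  | succ n ih =>
    intro l acc h
    cases l with
    | nil => simp [PySem.Chars.replace.go, pvRep2_nil]
    | cons c t =>
      rw [PySem.Chars.replace.go]
      simp only [List.length_cons] at h
      cases t with
      | nil =>
        have hpre : List.isPrefixOf [a, b] [c] = false := by simp [List.isPrefixOf]
        rw [hpre]
        simp only [Bool.false_eq_true, if_neg, not_false_iff]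
        rw [ih _ _ (by simp)]
        simp [pvRep2_nil, pvRep2_one]
      | cons d t' =>
        simp only [List.length_cons] at h
        by_cases hab : c = a ∧ d = b
        · obtain ⟨hc, hd⟩ := hab
          subst hc; subst hd
          have hpre : List.isPrefixOf [c, d] (c :: d :: t') = true := by simp [List.isPrefixOf]
          rw [hpre]
          simp only [if_pos]
          rw [show List.drop (List.length [c, d]) (c :: d :: t') = t' from rfl]
          rw [ih _ _ (by omega)]
          rw [pvRep2_cons2]
          simp
        · have hpre : List.isPrefixOf [a, b] (c :: d :: t') = false := by
            simp [List.isPrefixOf]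
            intro h1 h2
            exact absurd ⟨h1.symm, h2.symm⟩ hab
          rw [hpre]
          simp only [Bool.false_eq_true, if_neg, not_false_iff]
          rw [ih _ _ (by simp; omega)]
          rw [pvRep2_cons2]
          simp [if_neg hab]

lemma pv_replace_two (a b : Char) (v l : List Char) :
    PySem.Chars.replace l [a, b] v = pvRep2 a b v l := by
  rw [PySem.Chars.replace]
  simp only [List.isEmpty_cons, Bool.false_eq_true, if_neg, not_false_iff]
  simpa using pv_go_two a b v l.length l [] le_rfl

lemma pvRep2_cons_ne (a b : Char) (v : List Char) (c : Char) (t : List Char) (hc : c ≠ a) :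
    pvRep2 a b v (c :: t) = c :: pvRep2 a b v t := by
  cases t with
  | nil => rw [pvRep2_one, pvRep2_nil]
  | cons d t' => rw [pvRep2_cons2, if_neg (fun h => hc h.1)]

lemma pvRep2_append_of_not_mem (a b : Char) (v : List Char) (pre l : List Char) (hp : a ∉ pre) :
    pvRep2 a b v (pre ++ l) = pre ++ pvRep2 a b v l := by
  induction pre with
  | nil => simp
  | cons p pre' ih =>
    simp only [List.mem_cons, not_or] at hp
    rw [List.cons_append, pvRep2_cons_ne a b v p _ (fun he => hp.1 he.symm), ih hp.2]
    simp

-- combined effect of the two path-mode passes (replace '\\' then replace '\/')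
def pvScanBS : List Char → List Char
  | [] => []
  | [c] => [c]
  | c :: d :: t =>
    if c = '\\' ∧ d = '\\' then pvU5C ++ pvScanBS t
    else if c = '\\' ∧ d = '/' then pvU2F ++ pvScanBS t
    else c :: pvScanBS (d :: t)
  termination_by l => l.length

lemma pvScanBS_nil : pvScanBS [] = [] := by rw [pvScanBS]
lemma pvScanBS_one (c : Char) : pvScanBS [c] = [c] := by rw [pvScanBS]
lemma pvScanBS_cons2 (c d : Char) (t : List Char) :
    pvScanBS (c :: d :: t) =
      if c = '\\' ∧ d = '\\' then pvU5C ++ pvScanBS t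
      else if c = '\\' ∧ d = '/' then pvU2F ++ pvScanBS t
      else c :: pvScanBS (d :: t) := by
  rw [pvScanBS]

lemma pvScanBS_cons_ne (c : Char) (t : List Char) (hc : c ≠ '\\') :
    pvScanBS (c :: t) = c :: pvScanBS t := by
  cases t with
  | nil => rw [pvScanBS_one, pvScanBS_nil]
  | cons d t' => rw [pvScanBS_cons2, if_neg (fun h => hc h.1), if_neg (fun h => hc h.1)]

lemma pv_two_passes_aux : ∀ (n : Nat) (l : List Char), l.length ≤ n →
    pvRep2 '\\' '/' pvU2F (pvRep2 '\\' '\\' pvU5C l) = pvScanBS l := by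
  intro n
  induction n with
  | zero =>
    intro l h
    have hl : l = [] := by cases l <;> simp_all
    subst hl
    rw [pvRep2_nil, pvRep2_nil, pvScanBS_nil]
  | succ n ih =>
    intro l h
    match l with
    | [] => rw [pvRep2_nil, pvRep2_nil, pvScanBS_nil]
    | [c] => rw [pvRep2_one, pvRep2_one, pvScanBS_one]
    | c :: d :: t =>
      simp only [List.length_cons] at h
      by_cases hc : c = '\\'
      · subst hc
        by_cases hd : d = '\\'
        · subst hd
          rw [pvRep2_cons2, if_pos ⟨rfl, rfl⟩,
              pvRep2_append_of_not_mem _ _ _ _ _ (by decide),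
              ih t (by omega), pvScanBS_cons2, if_pos ⟨rfl, rfl⟩]
        · by_cases hd2 : d = '/'
          · subst hd2
            rw [pvRep2_cons2, if_neg (by decide),
                pvRep2_cons_ne '\\' '\\' pvU5C '/' t (by decide),
                pvRep2_cons2, if_pos ⟨rfl, rfl⟩,
                ih t (by omega), pvScanBS_cons2, if_neg (by decide), if_pos ⟨rfl, rfl⟩]
          · rw [pvRep2_cons2, if_neg (fun h => hd h.2),
                pvRep2_cons_ne '\\' '\\' pvU5C d t hd,
                pvRep2_cons2, if_neg (fun h => hd2 h.2),
                pvRep2_cons_ne '\\' '/' pvU2F d _ hd,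
                ih t (by omega), pvScanBS_cons2, if_neg (fun h => hd h.2),
                if_neg (fun h => hd2 h.2), pvScanBS_cons_ne d t hd]
      · rw [pvRep2_cons_ne _ _ _ _ _ hc, pvRep2_cons_ne _ _ _ _ _ hc,
            ih (d :: t) (by simp; omega), pvScanBS_cons_ne _ _ hc]

lemma pv_two_passes (l : List Char) :
    pvRep2 '\\' '/' pvU2F (pvRep2 '\\' '\\' pvU5C l) = pvScanBS l :=
  pv_two_passes_aux l.length l le_rfl

-- the seven single-character passes, innermost applied first (the order of A's dict)
def pvSeven (x : List Char) : List Char :=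
  PySem.Chars.replace (PySem.Chars.replace (PySem.Chars.replace (PySem.Chars.replace
    (PySem.Chars.replace (PySem.Chars.replace (PySem.Chars.replace x
      [':'] "U+003A".toList) ['*'] "U+002A".toList) ['?'] "U+003F".toList)
      ['"'] "U+0022".toList) ['<'] "U+003C".toList) ['>'] "U+003E".toList) ['|'] "U+007C".toList

lemma pvSeven_flat (l : List Char) : pvSeven l = l.flatMap (fun c => pvSeven [c]) := by
  simp only [pvSeven, pv_replace_single, List.flatMap_assoc]
  simp

lemma pvSeven_char (c : Char) : pvSeven [c] = pvEncChar true c := by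
  by_cases h1 : c = ':'; · subst h1; decide
  by_cases h2 : c = '*'; · subst h2; decide
  by_cases h3 : c = '?'; · subst h3; decide
  by_cases h4 : c = '"'; · subst h4; decide
  by_cases h5 : c = '<'; · subst h5; decide
  by_cases h6 : c = '>'; · subst h6; decide
  by_cases h7 : c = '|'; · subst h7; decide
  simp [pvSeven, pv_replace_single, pvEncChar, h1, h2, h3, h4, h5, h6, h7]

lemma pvEncChar_false_eq (c : Char) (h1 : c ≠ '\\') (h2 : c ≠ '/') :
    pvEncChar false c = pvEncChar true c := by
  simp [pvEncChar, h1, h2]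

lemma pvEncGo_nil (path : Bool) : pvEncGo path [] = [] := by rw [pvEncGo]
lemma pvEncGo_one (path : Bool) (c : Char) : pvEncGo path [c] = pvEncChar path c := by rw [pvEncGo]
lemma pvEncGo_cons2 (path : Bool) (c d : Char) (t : List Char) :
    pvEncGo path (c :: d :: t) =
      if path = true ∧ c = '\\' ∧ (d = '\\' ∨ d = '/') then
        (if d = '\\' then "U+005C".toList else "U+002F".toList) ++ pvEncGo path t
      else pvEncChar path c ++ pvEncGo path (d :: t) := by
  rw [pvEncGo]

-- path mode: mapping pvEncChar over the two-pass result is B's one-pass scan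
lemma pv_flat_scan_aux : ∀ (n : Nat) (l : List Char), l.length ≤ n →
    (pvScanBS l).flatMap (fun c => pvEncChar true c) = pvEncGo true l := by
  intro n
  induction n with
  | zero =>
    intro l h
    have hl : l = [] := by cases l <;> simp_all
    subst hl
    rw [pvScanBS_nil, pvEncGo_nil]
    rfl
  | succ n ih =>
    intro l h
    match l with
    | [] => rw [pvScanBS_nil, pvEncGo_nil]; rfl
    | [c] => rw [pvScanBS_one, pvEncGo_one]; simp
    | c :: d :: t =>
      simp only [List.length_cons] at h
      by_cases hc : c = '\\'
      · subst hc
        by_cases hd : d = '\\'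
        · subst hd
          rw [pvScanBS_cons2, if_pos ⟨rfl, rfl⟩, List.flatMap_append, ih t (by omega),
              pvEncGo_cons2, if_pos ⟨rfl, rfl, Or.inl rfl⟩, if_pos rfl]
          congr 1
        · by_cases hd2 : d = '/'
          · subst hd2
            rw [pvScanBS_cons2, if_neg (by decide), if_pos ⟨rfl, rfl⟩, List.flatMap_append,
                ih t (by omega), pvEncGo_cons2, if_pos ⟨rfl, rfl, Or.inr rfl⟩, if_neg (by decide)]
            congr 1
          · rw [pvScanBS_cons2, if_neg (fun h => hd h.2), if_neg (fun h => hd2 h.2),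
                List.flatMap_cons, ih (d :: t) (by simp; omega), pvEncGo_cons2,
                if_neg (fun h => (h.2.2.elim hd hd2))]
      · rw [pvScanBS_cons_ne _ _ hc, List.flatMap_cons, ih (d :: t) (by simp; omega),
            pvEncGo_cons2, if_neg (fun h => hc h.2.1)]

-- non-path mode: B's scan is the per-character map
lemma pv_flat_false (l : List Char) : l.flatMap (fun c => pvEncChar false c) = pvEncGo false l := by
  induction l with
  | nil => simp [pvEncGo_nil]
  | cons c t ih =>
    have hstep : pvEncGo false (c :: t) = pvEncChar false c ++ pvEncGo false t := by
      cases t with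
      | nil => rw [pvEncGo_one]; simp [pvEncGo_nil]
      | cons d t' => rw [pvEncGo_cons2, if_neg (fun h => by simp at h)]
    rw [List.flatMap_cons, ih, hstep]

lemma pv_chain_path (l : List Char) :
    pvSeven (PySem.Chars.replace (PySem.Chars.replace l ['\\', '\\'] "U+005C".toList)
      ['\\', '/'] "U+002F".toList) = pvEncGo true l := by
  rw [show ("U+005C" : String).toList = pvU5C from by decide,
      show ("U+002F" : String).toList = pvU2F from by decide,
      pv_replace_two, pv_replace_two, pv_two_passes, pvSeven_flat]
  simp only [pvSeven_char]
  exact pv_flat_scan_aux l.length l le_rfl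

lemma pv_chain_false (l : List Char) :
    pvSeven (PySem.Chars.replace (PySem.Chars.replace l ['\\'] "U+005C".toList)
      ['/'] "U+002F".toList) = pvEncGo false l := by
  rw [pv_replace_single, pv_replace_single, List.flatMap_assoc, pvSeven_flat, List.flatMap_assoc]
  rw [← pv_flat_false]
  apply List.flatMap_congr
  intro c _
  by_cases h1 : c = '\\'
  · subst h1; decide
  by_cases h2 : c = '/'
  · subst h2; decide
  simp only [if_neg h1]
  simp [pvSeven_char, pvEncChar_false_eq c h1 h2, h2]

-- ===== VERDICT (by name: the statement is the Claim_ definition above) =====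
theorem encode_unicode_encoding_spec : Claim_equal_encode_unicode_encoding := by
  unfold Claim_equal_encode_unicode_encoding Spec_encode_unicode_encoding
  intro s ty _
  unfold encode_unicode_encoding encode_unicode_encoding_alt
  refine String.toList_inj.mp ?_
  cases hb : (ty == "path") with
  | true =>
    have hi : (PySem.Dict.update (PySem.Dict.mk [("\\\\", "U+005C"), ("\\/", "U+002F")])
        [(":", "U+003A"), ("*", "U+002A"), ("?", "U+003F"), ("\"", "U+0022"),
         ("<", "U+003C"), (">", "U+003E"), ("|", "U+007C")]).items =
        [("\\\\", "U+005C"), ("\\/", "U+002F"), (":", "U+003A"), ("*", "U+002A"),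
         ("?", "U+003F"), ("\"", "U+0022"), ("<", "U+003C"), (">", "U+003E"),
         ("|", "U+007C")] := by decide
    simp only [if_true, hi, List.foldl, String.toList_ofList, PySem.Str.toList_replace]
    rw [show ("\\\\" : String).toList = ['\\', '\\'] from by decide,
        show ("\\/" : String).toList = ['\\', '/'] from by decide,
        show (":" : String).toList = [':'] from by decide,
        show ("*" : String).toList = ['*'] from by decide,
        show ("?" : String).toList = ['?'] from by decide,
        show ("\"" : String).toList = ['"'] from by decide,
        show ("<" : String).toList = ['<'] from by decide,
        show (">" : String).toList = ['>'] from by decide,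
        show ("|" : String).toList = ['|'] from by decide]
    exact pv_chain_path s.toList
  | false =>
    have hi : (PySem.Dict.update (PySem.Dict.mk [("\\", "U+005C"), ("/", "U+002F")])
        [(":", "U+003A"), ("*", "U+002A"), ("?", "U+003F"), ("\"", "U+0022"),
         ("<", "U+003C"), (">", "U+003E"), ("|", "U+007C")]).items =
        [("\\", "U+005C"), ("/", "U+002F"), (":", "U+003A"), ("*", "U+002A"),
         ("?", "U+003F"), ("\"", "U+0022"), ("<", "U+003C"), (">", "U+003E"),
         ("|", "U+007C")] := by decide
    simp only [Bool.false_eq_true, if_false, hi, List.foldl, String.toList_ofList,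
               PySem.Str.toList_replace]
    rw [show ("\\" : String).toList = ['\\'] from by decide,
        show ("/" : String).toList = ['/'] from by decide,
        show (":" : String).toList = [':'] from by decide,
        show ("*" : String).toList = ['*'] from by decide,
        show ("?" : String).toList = ['?'] from by decide,
        show ("\"" : String).toList = ['"'] from by decide,
        show ("<" : String).toList = ['<'] from by decide,
        show (">" : String).toList = ['>'] from by decide,
        show ("|" : String).toList = ['|'] from by decide]
    exact pv_chain_false s.toList
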